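-- pv_equiv track=rewrite | github.com/oatsu-gh/ENUNU | synthesis/extensions/f0_smoother.py | get_adjusted_widths
-- ===== SOURCE A (Python) =====
-- def get_adjusted_widths(f0_list: list, rapid_f0_change_indices: list, default_width: int):
--     """基準値を計算するための値に0が含まれてしまうときに幅を狭くして返す。
--
--     返すリストは 0 以上の整数からなるリストで、
--     0の時は補正を行わないことになるのでスキップしていいと思う。
--     """
--     # 万が一負の値が入ったていたら止める
--     assert default_width >= 0
--
--     # 結果を格納するリスト
--     adjusted_widths = []
--     len_f0_list = len(f0_list)
--
--     # 指定されたf0の点の周辺を順に調べる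
--     for f0_idx in rapid_f0_change_indices:
--         # 急峻な変化をする2点の前後を近い順に調査
--         width = default_width
--         # そもそも両端がIndexErrorになってしまうのを回避する必要がある。
--         # f0の長さが足りない場合は補正幅を狭める。
--         while (f0_idx - width) < 0 or (f0_idx + width + 1) > len_f0_list:
--             width -= 1
--         # 両端のf0が0な場合は、平滑化の幅を狭める。
--         # ただし、wが負になって右側と左側のf0の位置が逆転する前にループを止める。
--         # while width > 0 and (f0_list[f0_idx - width] == 0 or f0_list[f0_idx + width + 1] == 0):
--         while width > 0 and (0 in f0_list[f0_idx - width: f0_idx + width + 2]):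
--             width -= 1
--         # 調整後の値をリストに追加
--         adjusted_widths.append(width)
--
--     # 一応長さ確認
--     assert len(adjusted_widths) == len(rapid_f0_change_indices)
--
--     # 調整した幅の一覧をリストにして返す
--     return adjusted_widths
-- ===== SOURCE B (Python) =====
-- def get_adjusted_widths(f0_list: list, rapid_f0_change_indices: list, default_width: int):
--     assert default_width >= 0
--     n = len(f0_list)
--     BIG = 10 ** 18
--     # left_dist[i]  = distance from i to the nearest zero at or left of i  (BIG if none)
--     # right_dist[i] = distance from i to the nearest zero at or right of i (BIG if none)
--     left_dist = [0] * n
--     d = BIG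
--     for i in range(n):
--         d = 0 if f0_list[i] == 0 else (d if d == BIG else d + 1)
--         left_dist[i] = d
--     right_dist = [0] * n
--     d = BIG
--     for i in range(n - 1, -1, -1):
--         d = 0 if f0_list[i] == 0 else (d if d == BIG else d + 1)
--         right_dist[i] = d
--     out = []
--     for i in rapid_f0_change_indices:
--         w0 = min(default_width, i, n - 1 - i)
--         if w0 <= 0:
--             out.append(w0)
--         else:
--             min_d = min(left_dist[i], right_dist[i + 1])
--             out.append(max(0, min(w0, min_d - 1)))
--     return out
-- ===== Notes on version B (the rewrite author's own statement) =====
-- stated objective: faster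
-- what changed: Instead of A's per-index decremental loops that re-slice and re-scan the window for zeros at every shrink step, B precomputes in two linear passes the distance from every position to the nearest zero on each side and answers every index with a closed-form min/max in O(1).
import Mathlib
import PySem

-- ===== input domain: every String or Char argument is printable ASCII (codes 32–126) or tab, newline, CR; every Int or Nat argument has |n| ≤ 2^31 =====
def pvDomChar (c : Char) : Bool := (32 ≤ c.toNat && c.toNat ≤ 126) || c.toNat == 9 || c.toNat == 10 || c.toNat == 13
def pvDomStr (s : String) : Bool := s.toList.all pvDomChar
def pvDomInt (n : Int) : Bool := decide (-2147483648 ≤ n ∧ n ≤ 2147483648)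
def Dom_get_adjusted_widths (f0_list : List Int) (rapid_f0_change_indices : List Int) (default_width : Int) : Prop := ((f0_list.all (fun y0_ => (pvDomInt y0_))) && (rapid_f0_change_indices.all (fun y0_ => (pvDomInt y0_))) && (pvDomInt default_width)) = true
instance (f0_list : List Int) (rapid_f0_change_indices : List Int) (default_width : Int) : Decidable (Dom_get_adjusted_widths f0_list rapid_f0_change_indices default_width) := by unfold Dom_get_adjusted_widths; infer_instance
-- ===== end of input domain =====

-- B replaces A's per-index decremental window re-scans by two linear passes that precompute,
-- for every position, the distance to the nearest zero on each side, then answers each index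
-- with a closed-form min/max; objective: faster.

-- ===== PORT A =====
-- first while loop: shrink width until the window endpoints are in bounds
-- (structural recursion on a fuel that provably dominates the number of iterations)
def pvLoop1Go (f0_idx len_f0 : Int) : Nat → Int → Int
  | 0, width => width
  | fuel + 1, width =>
    if f0_idx - width < 0 ∨ f0_idx + width + 1 > len_f0 then
      pvLoop1Go f0_idx len_f0 fuel (width - 1)
    else width

def pvLoop1 (f0_idx len_f0 : Int) (width : Int) : Int :=
  pvLoop1Go f0_idx len_f0 (width - min f0_idx (len_f0 - f0_idx - 1)).toNat width

-- second while loop: shrink width while a zero lies in the window slice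
def pvLoop2Go (f0_list : List Int) (f0_idx : Int) : Nat → Int → Int
  | 0, width => width
  | fuel + 1, width =>
    if 0 < width ∧ 0 ∈ PySem.List.slice f0_list (some (f0_idx - width)) (some (f0_idx + width + 2)) then
      pvLoop2Go f0_list f0_idx fuel (width - 1)
    else width

def pvLoop2 (f0_list : List Int) (f0_idx : Int) (width : Int) : Int :=
  pvLoop2Go f0_list f0_idx width.toNat width

def get_adjusted_widths (f0_list : List Int) (rapid_f0_change_indices : List Int) (default_width : Int) : List Int :=
  let len_f0_list : Int := f0_list.length
  rapid_f0_change_indices.foldl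
    (fun adjusted_widths f0_idx =>
      adjusted_widths ++ [pvLoop2 f0_list f0_idx (pvLoop1 f0_idx len_f0_list default_width)])
    []

-- ===== PORT B =====
def pvBIG : Int := 10 ^ 18

-- one stateful pass: d := 0 at a zero, else d+1 (saturating at the BIG sentinel)
def pvScan (d : Int) : List Int → List Int
  | [] => []
  | x :: xs =>
      let d' := if x = 0 then 0 else (if d = pvBIG then d else d + 1)
      d' :: pvScan d' xs

-- B indexes left_dist/right_dist only at in-range positions; pyGetD's default is never used there.
def get_adjusted_widths_alt (f0_list : List Int) (rapid_f0_change_indices : List Int) (default_width : Int) : List Int :=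
  let n : Int := f0_list.length
  let left_dist := pvScan pvBIG f0_list
  let right_dist := (pvScan pvBIG f0_list.reverse).reverse
  rapid_f0_change_indices.map (fun i =>
    let w0 := min default_width (min i (n - 1 - i))
    if w0 ≤ 0 then w0
    else
      let min_d := min (PySem.List.pyGetD left_dist i 0) (PySem.List.pyGetD right_dist (i + 1) 0)
      max 0 (min w0 (min_d - 1)))

-- ===== PRECONDITION & SPEC =====
-- Pre_ excludes only default_width < 0, where A raises AssertionError.
def Pre_get_adjusted_widths (f0_list : List Int) (rapid_f0_change_indices : List Int) (default_width : Int) : Prop :=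
  0 ≤ default_width
instance (f0_list : List Int) (rapid_f0_change_indices : List Int) (default_width : Int) : Decidable (Pre_get_adjusted_widths f0_list rapid_f0_change_indices default_width) := by unfold Pre_get_adjusted_widths; infer_instance

def pvWitness_get_adjusted_widths : List Int × List Int × Int := ([1, 0, 3, 4, 5], [2, 0], 2)

def Spec_get_adjusted_widths (f0_list : List Int) (rapid_f0_change_indices : List Int) (default_width : Int) (out : List Int) : Prop := out = get_adjusted_widths_alt f0_list rapid_f0_change_indices default_width
instance (f0_list : List Int) (rapid_f0_change_indices : List Int) (default_width : Int) (out : List Int) : Decidable (Spec_get_adjusted_widths f0_list rapid_f0_change_indices default_width out) := by unfold Spec_get_adjusted_widths; infer_instance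

-- ===== CLAIM (what is proved, stated in full; the proofs are below) =====
def Claim_equal_get_adjusted_widths : Prop := ∀ (f0_list : List Int) (rapid_f0_change_indices : List Int) (default_width : Int), Dom_get_adjusted_widths f0_list rapid_f0_change_indices default_width → Pre_get_adjusted_widths f0_list rapid_f0_change_indices default_width → Spec_get_adjusted_widths f0_list rapid_f0_change_indices default_width (get_adjusted_widths f0_list rapid_f0_change_indices default_width)

-- ===== LEMMAS AND PROOFS =====

theorem pvLoop1Go_eq (f0_idx len_f0 : Int) (fuel : Nat) :
    ∀ w : Int, (w - min f0_idx (len_f0 - f0_idx - 1)).toNat ≤ fuel →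
    pvLoop1Go f0_idx len_f0 fuel w = min w (min f0_idx (len_f0 - f0_idx - 1)) := by
  induction fuel with
  | zero => intro w hw; simp only [pvLoop1Go]; omega
  | succ fuel ih =>
    intro w hw
    rw [pvLoop1Go]
    split_ifs with h
    · rw [ih (w - 1) (by omega)]; omega
    · omega

theorem pvLoop1_eq (f0_idx len_f0 w : Int) :
    pvLoop1 f0_idx len_f0 w = min w (min f0_idx (len_f0 - f0_idx - 1)) :=
  pvLoop1Go_eq f0_idx len_f0 _ w le_rfl

theorem pvScan_length (d : Int) (xs : List Int) : (pvScan d xs).length = xs.length := by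
  induction xs generalizing d with
  | nil => rfl
  | cons x xs ih => simp [pvScan, ih]

theorem pvScan_char (xs : List Int) (d : Int) (hd : d = pvBIG ∨ (0 ≤ d ∧ d < pvBIG))
    (k : Nat) (hk : k < xs.length) :
    0 ≤ (pvScan d xs).getD k 0 ∧
    (pvScan d xs).getD k 0 ≤ pvBIG ∧
    (∀ p : Nat, p ≤ k → xs.getD p 1 = 0 → (pvScan d xs).getD k 0 ≤ (k : Int) - (p : Int)) ∧
    ((pvScan d xs).getD k 0 < pvBIG →
      (∃ p : Nat, p ≤ k ∧ xs.getD p 1 = 0 ∧ (pvScan d xs).getD k 0 = (k : Int) - (p : Int)) ∨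
      (d < pvBIG ∧ (pvScan d xs).getD k 0 = d + ((k : Int) + 1))) ∧
    (d < pvBIG → (pvScan d xs).getD k 0 ≤ d + ((k : Int) + 1)) := by
  induction xs generalizing d k with
  | nil => simp at hk
  | cons x xs ih =>
    simp only [pvScan]
    set d' : Int := if x = 0 then 0 else (if d = pvBIG then d else d + 1) with hd'
    clear_value d'
    have hd'inv : d' = pvBIG ∨ (0 ≤ d' ∧ d' < pvBIG) := by
      rw [hd']; split_ifs with h1 h2
      · right; constructor <;> norm_num [pvBIG]
      · left; exact h2
      · rcases hd with h | h
        · exact absurd h h2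
        · by_cases hb : d + 1 = pvBIG
          · left; exact hb
          · right; omega
    rcases k with _ | k
    · -- k = 0 : value is d'
      simp only [List.getD_cons_zero]
      refine ⟨?_, ?_, ?_, ?_, ?_⟩
      · rcases hd with h | h <;> rw [hd'] <;> split_ifs <;> simp [pvBIG] at * <;> omega
      · rcases hd with h | h <;> rw [hd'] <;> split_ifs <;> simp [pvBIG] at * <;> omega
      · intro p hp hz
        interval_cases p
        simp only [List.getD_cons_zero] at hz
        rw [hd']; simp [hz]
      · intro hlt
        by_cases hx : x = 0
        · left; exact ⟨0, le_refl _, by simpa using hx, by rw [hd']; simp [hx]⟩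
        · right
          rw [hd'] at hlt ⊢
          simp only [if_neg hx] at hlt ⊢
          rcases hd with h | h
          · simp [h] at hlt
          · constructor
            · exact h.2
            · split_ifs with hb
              · omega
              · push_cast; ring
      · intro hdlt
        rw [hd']; split_ifs with h1 h2 <;> push_cast <;> omega
    · -- k+1 : value comes from the tail with state d'
      simp only [List.getD_cons_succ]
      have hk' : k < xs.length := by simpa using hk
      obtain ⟨ih0, ihB, ihmin, ihach, ihub⟩ := ih d' hd'inv k hk'
      refine ⟨ih0, ihB, ?_, ?_, ?_⟩
      · intro p hp hz
        rcases p with _ | p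
        · -- zero at the head: x = 0, so d' = 0 and the upper bound applies
          simp only [List.getD_cons_zero] at hz
          have : d' = 0 := by rw [hd']; simp [hz]
          have := ihub (by rw [this]; norm_num [pvBIG])
          push_cast
          omega
        · simp only [List.getD_cons_succ] at hz
          have := ihmin p (by omega) hz
          push_cast at this ⊢
          omega
      · intro hlt
        rcases ihach hlt with ⟨p, hp, hz, hv⟩ | ⟨hdlt', hv⟩
        · left
          exact ⟨p + 1, by omega, by simpa using hz, by rw [hv]; push_cast; ring⟩
        · -- value inherited from d'
          by_cases hx : x = 0
          · left
            refine ⟨0, by omega, by simpa using hx, ?_⟩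
            have : d' = 0 := by rw [hd']; simp [hx]
            rw [hv, this]; push_cast; ring
          · right
            have hdb : d ≠ pvBIG := by
              intro hb
              have : d' = pvBIG := by rw [hd']; simp [hx, hb]
              omega
            have hdd' : d' = d + 1 := by rw [hd']; simp [hx, hdb]
            refine ⟨by rcases hd with h | h; exact absurd h hdb; exact h.2, ?_⟩
            rw [hv, hdd']; push_cast; ring
      · intro hdlt
        by_cases hx : x = 0
        · have h0 : d' = 0 := by rw [hd']; simp [hx]
          have h2 := ihub (by rw [h0]; norm_num [pvBIG])
          rcases hd with h | h
          · exact absurd h (by omega)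
          · push_cast at h2 ⊢
            omega
        · by_cases hb : d + 1 = pvBIG
          · push_cast; omega
          · have hdb : d ≠ pvBIG := by omega
            have hdd' : d' = d + 1 := by rw [hd']; simp [hx, hdb]
            have := ihub (by omega)
            push_cast at this ⊢
            omega

-- membership of 0 in A's window slice, as an existence statement over absolute indices

theorem mem_slice_iff (f0 : List Int) (i w : Int) (hw : 0 < w) (hwi : w ≤ i)
    (hwn : w ≤ (f0.length : Int) - 1 - i) :
    (0 ∈ PySem.List.slice f0 (some (i - w)) (some (i + w + 2))) ↔
    ∃ j : Nat, j < f0.length ∧ f0.getD j 1 = 0 ∧ i - w ≤ (j : Int) ∧ (j : Int) ≤ i + w + 1 := by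
  rw [PySem.List.slice_toNat f0 (by omega) (by omega)]
  rw [List.mem_iff_getElem]
  have hlen : (List.take ((i + w + 2).toNat - (i - w).toNat) (List.drop (i - w).toNat f0)).length
      = min ((i + w + 2).toNat - (i - w).toNat) (f0.length - (i - w).toNat) := by
    simp
  constructor
  · rintro ⟨j, hj, hv⟩
    rw [List.getElem_take, List.getElem_drop] at hv
    rw [hlen] at hj
    have hlt : (i - w).toNat + j < f0.length := by omega
    refine ⟨(i - w).toNat + j, hlt, ?_, by omega, by omega⟩
    rw [List.getD_eq_getElem f0 1 hlt, hv]
  · rintro ⟨j, hjlen, hz, hlo, hhi⟩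
    have hj' : j - (i - w).toNat < (List.take ((i + w + 2).toNat - (i - w).toNat) (List.drop (i - w).toNat f0)).length := by
      rw [hlen]; omega
    refine ⟨j - (i - w).toNat, hj', ?_⟩
    rw [List.getElem_take, List.getElem_drop]
    have heq : (i - w).toNat + (j - (i - w).toNat) = j := by omega
    simp only [heq]
    rw [← List.getD_eq_getElem f0 1 hjlen]; exact hz

-- the zero-in-window test equals "min of the two precomputed distances ≤ w"

theorem zero_window_iff (f0 : List Int) (i w : Int) (hw : 0 < w) (hwi : w ≤ i)
    (hwn : w ≤ (f0.length : Int) - 1 - i) (hwB : w < pvBIG) :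
    (0 ∈ PySem.List.slice f0 (some (i - w)) (some (i + w + 2))) ↔
    min (PySem.List.pyGetD (pvScan pvBIG f0) i 0)
        (PySem.List.pyGetD ((pvScan pvBIG f0.reverse).reverse) (i + 1) 0) ≤ w := by
  have hlen : 0 < f0.length := by omega
  have hBinv : (pvBIG : Int) = pvBIG ∨ (0 ≤ pvBIG ∧ pvBIG < pvBIG) := Or.inl rfl
  -- bridge the two pyGetD values to scan values at Nat indices
  have hi0 : 0 ≤ i := by omega
  have hilen : i < ((pvScan pvBIG f0).length : Int) := by rw [pvScan_length]; omega
  have hl : PySem.List.pyGetD (pvScan pvBIG f0) i 0 = (pvScan pvBIG f0).getD i.toNat 0 := by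
    rw [PySem.List.pyGetD_of_nonneg _ _ hi0]
  have hrevlen : ((pvScan pvBIG f0.reverse).reverse).length = f0.length := by
    rw [List.length_reverse, pvScan_length, List.length_reverse]
  have hr : PySem.List.pyGetD ((pvScan pvBIG f0.reverse).reverse) (i + 1) 0
      = (pvScan pvBIG f0.reverse).getD (f0.length - 1 - (i + 1).toNat) 0 := by
    rw [PySem.List.pyGetD_of_nonneg _ _ (by omega : (0:Int) ≤ i + 1)]
    have h1 : (i + 1).toNat < ((pvScan pvBIG f0.reverse).reverse).length := by rw [hrevlen]; omega
    rw [List.getD_eq_getElem _ _ h1, List.getElem_reverse]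
    have h2 : (pvScan pvBIG f0.reverse).length - 1 - (i + 1).toNat < (pvScan pvBIG f0.reverse).length := by
      rw [pvScan_length, List.length_reverse]; omega
    rw [← List.getD_eq_getElem _ 0 h2]
    congr 1
    rw [pvScan_length, List.length_reverse]
  obtain ⟨hL0, hLB, hLmin, hLach, -⟩ :=
    pvScan_char f0 pvBIG hBinv i.toNat (by omega)
  obtain ⟨hR0, hRB, hRmin, hRach, -⟩ :=
    pvScan_char f0.reverse pvBIG hBinv (f0.length - 1 - (i + 1).toNat) (by simp; omega)
  have hrevget : ∀ p : Nat, p < f0.length → f0.reverse.getD p 1 = f0.getD (f0.length - 1 - p) 1 := by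
    intro p hp
    rw [List.getD_eq_getElem _ _ (by simpa using hp), List.getElem_reverse,
      ← List.getD_eq_getElem _ 1 (by omega)]
  rw [mem_slice_iff f0 i w hw hwi hwn, hl, hr]
  constructor
  · rintro ⟨j, hjlen, hz, hlo, hhi⟩
    by_cases hji : (j : Int) ≤ i
    · -- zero on the left: left distance is ≤ i - j ≤ w
      have := hLmin j (by omega) hz
      omega
    · -- zero on the right: right distance at i+1 is ≤ j - (i+1) ≤ w
      have hp : f0.length - 1 - j ≤ f0.length - 1 - (i + 1).toNat := by omega
      have hz' : f0.reverse.getD (f0.length - 1 - j) 1 = 0 := by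
        rw [hrevget _ (by omega)]
        have heq : f0.length - 1 - (f0.length - 1 - j) = j := by omega
        rw [heq]; exact hz
      have := hRmin (f0.length - 1 - j) hp hz'
      omega
  · intro hmin
    rcases le_or_gt ((pvScan pvBIG f0).getD i.toNat 0) w with hLw | hLw
    · rcases hLach (by omega) with ⟨p, hp, hz, hv⟩ | ⟨hcon, -⟩
      · exact ⟨p, by omega, hz, by omega, by omega⟩
      · exact absurd hcon (lt_irrefl _)
    · have hRw : (pvScan pvBIG f0.reverse).getD (f0.length - 1 - (i + 1).toNat) 0 ≤ w := by omega
      rcases hRach (by omega) with ⟨p, hp, hz, hv⟩ | ⟨hcon, -⟩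
      · refine ⟨f0.length - 1 - p, by omega, ?_, by omega, by omega⟩
        rw [← hrevget p (by omega)]
        exact hz
      · exact absurd hcon (lt_irrefl _)

theorem pvLoop2Go_eq (f0 : List Int) (i M : Int) (hM : 0 ≤ M)
    (hchar : ∀ w : Int, 0 < w → w ≤ i → w ≤ (f0.length : Int) - 1 - i → w < pvBIG →
      ((0 ∈ PySem.List.slice f0 (some (i - w)) (some (i + w + 2))) ↔ M ≤ w))
    (fuel : Nat) :
    ∀ w : Int, w.toNat ≤ fuel → 0 ≤ w → w ≤ i → w ≤ (f0.length : Int) - 1 - i → w < pvBIG →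
    pvLoop2Go f0 i fuel w = max 0 (min w (M - 1)) := by
  induction fuel with
  | zero =>
    intro w hf h0 h1 h2 h3
    simp only [pvLoop2Go]
    omega
  | succ fuel ih =>
    intro w hf h0 h1 h2 h3
    rw [pvLoop2Go]
    split_ifs with h
    · have hMw : M ≤ w := (hchar w h.1 h1 h2 h3).mp h.2
      rw [ih (w - 1) (by omega) (by omega) (by omega) (by omega) (by omega)]
      omega
    · by_cases hw : 0 < w
      · have hnm : ¬ (0 ∈ PySem.List.slice f0 (some (i - w)) (some (i + w + 2))) :=
          fun hm => h ⟨hw, hm⟩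
        have hnM : ¬ M ≤ w := fun hMw => hnm ((hchar w hw h1 h2 h3).mpr hMw)
        omega
      · omega

theorem pvLoop2_eq (f0 : List Int) (i M : Int) (hM : 0 ≤ M)
    (hchar : ∀ w : Int, 0 < w → w ≤ i → w ≤ (f0.length : Int) - 1 - i → w < pvBIG →
      ((0 ∈ PySem.List.slice f0 (some (i - w)) (some (i + w + 2))) ↔ M ≤ w))
    (w : Int) :
    0 ≤ w → w ≤ i → w ≤ (f0.length : Int) - 1 - i → w < pvBIG →
    pvLoop2 f0 i w = max 0 (min w (M - 1)) := by
  intro h0 h1 h2 h3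
  exact pvLoop2Go_eq f0 i M hM hchar w.toNat w le_rfl h0 h1 h2 h3

theorem elem_eq (f0 : List Int) (i dw : Int) (hdw : dw ≤ 2147483648) :
    pvLoop2 f0 i (pvLoop1 i (f0.length : Int) dw) =
    (if min dw (min i ((f0.length : Int) - 1 - i)) ≤ 0 then
        min dw (min i ((f0.length : Int) - 1 - i))
      else
        max 0 (min (min dw (min i ((f0.length : Int) - 1 - i)))
          (min (PySem.List.pyGetD (pvScan pvBIG f0) i 0)
            (PySem.List.pyGetD ((pvScan pvBIG f0.reverse).reverse) (i + 1) 0) - 1))) := by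
  rw [pvLoop1_eq]
  have hnorm : (f0.length : Int) - i - 1 = (f0.length : Int) - 1 - i := by ring
  rw [hnorm]
  set w0 := min dw (min i ((f0.length : Int) - 1 - i)) with hw0
  by_cases hle : w0 ≤ 0
  · rw [if_pos hle]
    have hz : w0.toNat = 0 := by omega
    rw [pvLoop2, hz]
    rfl
  · rw [if_neg hle]
    have hw0pos : 0 < w0 := by omega
    have hi0 : (0:Int) < i := by omega
    have hin : i < (f0.length : Int) - 1 := by omega
    set M := min (PySem.List.pyGetD (pvScan pvBIG f0) i 0)
      (PySem.List.pyGetD ((pvScan pvBIG f0.reverse).reverse) (i + 1) 0) with hMdef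
    have hM0 : 0 ≤ M := by
      have h1 : PySem.List.pyGetD (pvScan pvBIG f0) i 0 = (pvScan pvBIG f0).getD i.toNat 0 :=
        PySem.List.pyGetD_of_nonneg _ _ (by omega)
      have h2 : PySem.List.pyGetD ((pvScan pvBIG f0.reverse).reverse) (i + 1) 0
          = ((pvScan pvBIG f0.reverse).reverse).getD (i + 1).toNat 0 :=
        PySem.List.pyGetD_of_nonneg _ _ (by omega)
      have hBinv : (pvBIG : Int) = pvBIG ∨ (0 ≤ pvBIG ∧ pvBIG < pvBIG) := Or.inl rfl
      obtain ⟨hL0, -, -, -, -⟩ := pvScan_char f0 pvBIG hBinv i.toNat (by omega)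
      have hlenrev : ((pvScan pvBIG f0.reverse).reverse).length = f0.length := by
        rw [List.length_reverse, pvScan_length, List.length_reverse]
      have hk : (i + 1).toNat < ((pvScan pvBIG f0.reverse).reverse).length := by omega
      have h3 : ((pvScan pvBIG f0.reverse).reverse).getD (i + 1).toNat 0
          = (pvScan pvBIG f0.reverse).getD ((pvScan pvBIG f0.reverse).length - 1 - (i + 1).toNat) 0 := by
        rw [List.getD_eq_getElem _ _ hk, List.getElem_reverse, ← List.getD_eq_getElem _ 0 (by
          rw [List.length_reverse, pvScan_length, List.length_reverse] at hk
          rw [pvScan_length, List.length_reverse]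
          omega)]
      obtain ⟨hR0, -, -, -, -⟩ := pvScan_char f0.reverse pvBIG hBinv
        ((pvScan pvBIG f0.reverse).length - 1 - (i + 1).toNat) (by
          simp only [pvScan_length, List.length_reverse]
          omega)
      rw [hMdef, h1, h2, h3]
      omega
    rw [pvLoop2_eq f0 i M hM0 (by
        intro w hw h1 h2 h3
        rw [hMdef]
        exact zero_window_iff f0 i w hw h1 h2 h3) w0 (by omega) (by omega) (by omega) (by
        have : (2147483648 : Int) < pvBIG := by norm_num [pvBIG]
        omega)]

-- ===== VERDICT (by name: the statement is the Claim_ definition above) =====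
theorem get_adjusted_widths_spec : Claim_equal_get_adjusted_widths := by
  intro f0_list rapid_f0_change_indices default_width hDom hPre
  unfold Spec_get_adjusted_widths
  have hdw : default_width ≤ 2147483648 := by
    unfold Dom_get_adjusted_widths at hDom
    simp only [Bool.and_eq_true, pvDomInt, decide_eq_true_eq] at hDom
    exact hDom.2.2
  simp only [get_adjusted_widths, get_adjusted_widths_alt]
  rw [PySem.List.foldl_append_singleton_eq_map, List.nil_append]
  apply List.map_congr_left
  intro i _
  exact elem_eq f0_list i default_width hdw
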